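-- pv_equiv track=rewrite | github.com/CriscasDK/elescriba_fgn_repo | core/chat/query_decomposer.py | _detect_pattern
-- ===== SOURCE A (Python) =====
-- from typing import List, Optional, Dict, Any
--
-- def _detect_pattern(query_text: str) -> Optional[str]:
--     """
--     Detecta el patrón de descomposición basado en keywords.
--
--     Returns:
--         Nombre del patrón o None si no se detecta
--     """
--     query_lower = query_text.lower()
--
--     # Patrón: Persona y relaciones
--     if ("quien es" in query_lower or "buscar" in query_lower) and \
--        ("relacion" in query_lower or "vínculo" in query_lower):
--         return "persona_y_relaciones"
--
--     # Patrón: Persona, documentos y contexto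
--     if ("documento" in query_lower or "expediente" in query_lower) and \
--        ("relacion" in query_lower or "contexto" in query_lower):
--         return "persona_docs_y_contexto"
--
--     # Patrón: Período y estadísticas
--     if any(year in query_lower for year in ["198", "199", "200"]) and \
--        ("cuántos" in query_lower or "estadística" in query_lower):
--         return "periodo_y_estadisticas"
--
--     # Patrón: Organización y red
--     if ("organización" in query_lower or "partido" in query_lower) and \
--        ("miembro" in query_lower or "red" in query_lower):
--         return "organizacion_y_red"
--
--     return None
-- ===== SOURCE B (Python) =====
-- _KEYWORDS = ["quien es", "buscar", "relacion", "v\u00ednculo", "documento",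
--              "expediente", "contexto", "198", "199", "200", "cu\u00e1ntos",
--              "estad\u00edstica", "organizaci\u00f3n", "partido", "miembro", "red"]
--
-- _RULES = [
--     ("persona_y_relaciones",    {"quien es", "buscar"},      {"relacion", "v\u00ednculo"}),
--     ("persona_docs_y_contexto", {"documento", "expediente"}, {"relacion", "contexto"}),
--     ("periodo_y_estadisticas",  {"198", "199", "200"},       {"cu\u00e1ntos", "estad\u00edstica"}),
--     ("organizacion_y_red",      {"organizaci\u00f3n", "partido"}, {"miembro", "red"}),
-- ]
--
--
-- def _detect_pattern(query_text):
--     # One left-to-right scan over the lowercased query collects the set of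
--     # keywords that occur anywhere; the rules are then decided by set
--     # intersection against that found-set.
--     q = query_text.lower()
--     found = set()
--     for i in range(len(q)):
--         for kw in _KEYWORDS:
--             if q.startswith(kw, i):
--                 found.add(kw)
--     for name, ga, gb in _RULES:
--         if found & ga and found & gb:
--             return name
--     return None
-- ===== Notes on version B (the rewrite author's own statement) =====
-- stated objective: alternative
-- what changed: Instead of evaluating four and/or substring conditions (each rescanning the query), B makes one left-to-right scan over the lowercased query collecting the set of keywords that start at each position, then decides the rules by set intersection against that found-set.
import Mathlib
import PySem

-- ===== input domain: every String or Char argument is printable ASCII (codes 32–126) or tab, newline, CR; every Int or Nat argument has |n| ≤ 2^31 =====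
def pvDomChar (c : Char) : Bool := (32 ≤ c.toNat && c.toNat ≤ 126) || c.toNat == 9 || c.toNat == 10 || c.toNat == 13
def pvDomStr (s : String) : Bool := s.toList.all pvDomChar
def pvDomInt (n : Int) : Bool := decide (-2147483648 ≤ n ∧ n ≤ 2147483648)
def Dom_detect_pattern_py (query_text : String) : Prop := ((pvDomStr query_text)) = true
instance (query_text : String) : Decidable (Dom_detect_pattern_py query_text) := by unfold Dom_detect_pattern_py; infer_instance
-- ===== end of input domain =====

-- B replaces A's four and/or substring conditions by one positional scan that collects
-- the set of keywords occurring in the query, then decides each rule by set intersection.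

-- ===== PORT A =====
def detect_pattern_py (query_text : String) : Option String :=
  let query_lower := PySem.Str.lower query_text
  if (PySem.Str.isIn "quien es" query_lower || PySem.Str.isIn "buscar" query_lower) &&
     (PySem.Str.isIn "relacion" query_lower || PySem.Str.isIn "vínculo" query_lower) then
    some "persona_y_relaciones"
  else if (PySem.Str.isIn "documento" query_lower || PySem.Str.isIn "expediente" query_lower) &&
          (PySem.Str.isIn "relacion" query_lower || PySem.Str.isIn "contexto" query_lower) then
    some "persona_docs_y_contexto"
  else if (["198", "199", "200"].any (fun year => PySem.Str.isIn year query_lower)) &&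
          (PySem.Str.isIn "cuántos" query_lower || PySem.Str.isIn "estadística" query_lower) then
    some "periodo_y_estadisticas"
  else if (PySem.Str.isIn "organización" query_lower || PySem.Str.isIn "partido" query_lower) &&
          (PySem.Str.isIn "miembro" query_lower || PySem.Str.isIn "red" query_lower) then
    some "organizacion_y_red"
  else
    none

-- ===== PORT B =====
def pvKeywords : List (List Char) :=
  ["quien es".toList, "buscar".toList, "relacion".toList, "vínculo".toList,
   "documento".toList, "expediente".toList, "contexto".toList,
   "198".toList, "199".toList, "200".toList, "cuántos".toList, "estadística".toList,
   "organización".toList, "partido".toList, "miembro".toList, "red".toList]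

def pvRules : List (String × List (List Char) × List (List Char)) :=
  [("persona_y_relaciones",    ["quien es".toList, "buscar".toList],       ["relacion".toList, "vínculo".toList]),
   ("persona_docs_y_contexto", ["documento".toList, "expediente".toList],  ["relacion".toList, "contexto".toList]),
   ("periodo_y_estadisticas",  ["198".toList, "199".toList, "200".toList], ["cuántos".toList, "estadística".toList]),
   ("organizacion_y_red",      ["organización".toList, "partido".toList],  ["miembro".toList, "red".toList])]

-- Python's q.startswith(kw, i) (0 ≤ i ≤ len(q)) is ported by hand, exactly, as
-- Chars.startswith (L.drop i) kw: both test that kw occurs at position i of q.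
def pvFound (L : List Char) : PySem.Set (List Char) :=
  (List.range L.length).foldl
    (fun acc i =>
      pvKeywords.foldl
        (fun a kw => if PySem.Chars.startswith (L.drop i) kw then PySem.Set.add a kw else a)
        acc)
    PySem.Set.empty

def detect_pattern_py_alt (query_text : String) : Option String :=
  let L := (PySem.Str.lower query_text).toList
  let found := pvFound L
  (pvRules.find? (fun r =>
      !(PySem.Set.inter found r.2.1).isEmpty && !(PySem.Set.inter found r.2.2).isEmpty)).map
    Prod.fst

-- ===== PRECONDITION & SPEC =====
def Spec_detect_pattern_py (query_text : String) (out : Option String) : Prop := out = detect_pattern_py_alt query_text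
instance (query_text : String) (out : Option String) : Decidable (Spec_detect_pattern_py query_text out) := by unfold Spec_detect_pattern_py; infer_instance

-- ===== CLAIM (what is proved, stated in full; the proofs are below) =====
def Claim_equal_detect_pattern_py : Prop := ∀ (query_text : String), Dom_detect_pattern_py query_text → Spec_detect_pattern_py query_text (detect_pattern_py query_text)

-- ===== LEMMAS AND PROOFS =====

-- membership in the inner per-position fold
theorem mem_inner_fold (L : List Char) (i : Nat) (ks : List (List Char))
    (acc : PySem.Set (List Char)) (kw : List Char) :
    kw ∈ ks.foldl
        (fun a k => if PySem.Chars.startswith (L.drop i) k then PySem.Set.add a k else a) acc ↔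
      kw ∈ acc ∨ (kw ∈ ks ∧ PySem.Chars.startswith (L.drop i) kw = true) := by
  induction ks generalizing acc with
  | nil => simp
  | cons k ks ih =>
    simp only [List.foldl_cons, ih, List.mem_cons]
    by_cases h : PySem.Chars.startswith (L.drop i) k = true
    · simp only [h, if_true, PySem.Set.mem_add]
      constructor
      · rintro ((h1 | rfl) | ⟨h2, hs⟩)
        · exact Or.inl h1
        · exact Or.inr ⟨Or.inl rfl, h⟩
        · exact Or.inr ⟨Or.inr h2, hs⟩
      · rintro (h1 | ⟨(rfl | h2), hs⟩)
        · exact Or.inl (Or.inl h1)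
        · exact Or.inl (Or.inr rfl)
        · exact Or.inr ⟨h2, hs⟩
    · rw [Bool.not_eq_true] at h
      simp only [h, Bool.false_eq_true, if_false]
      constructor
      · rintro (h1 | ⟨h2, hs⟩)
        · exact Or.inl h1
        · exact Or.inr ⟨Or.inr h2, hs⟩
      · rintro (h1 | ⟨(rfl | h2), hs⟩)
        · exact Or.inl h1
        · rw [h] at hs; exact absurd hs (by simp)
        · exact Or.inr ⟨h2, hs⟩

theorem mem_found_aux (L : List Char) (n : Nat) (acc : PySem.Set (List Char)) (kw : List Char) :
    kw ∈ (List.range n).foldl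
        (fun acc i =>
          pvKeywords.foldl
            (fun a k => if PySem.Chars.startswith (L.drop i) k then PySem.Set.add a k else a) acc)
        acc ↔
      kw ∈ acc ∨ (kw ∈ pvKeywords ∧ ∃ i < n, PySem.Chars.startswith (L.drop i) kw = true) := by
  induction n generalizing acc with
  | zero => simp
  | succ n ih =>
    rw [List.range_succ, List.foldl_append, List.foldl_cons, List.foldl_nil,
        mem_inner_fold, ih]
    constructor
    · rintro ((h1 | ⟨hk, i, hi, hs⟩) | ⟨hk, hs⟩)
      · exact Or.inl h1
      · exact Or.inr ⟨hk, i, Nat.lt_succ_of_lt hi, hs⟩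
      · exact Or.inr ⟨hk, n, Nat.lt_succ_self n, hs⟩
    · rintro (h1 | ⟨hk, i, hi, hs⟩)
      · exact Or.inl (Or.inl h1)
      · rcases Nat.lt_succ_iff_lt_or_eq.mp hi with hi | rfl
        · exact Or.inl (Or.inr ⟨hk, i, hi, hs⟩)
        · exact Or.inr ⟨hk, hs⟩

theorem mem_found (L : List Char) (kw : List Char) (hk : kw ∈ pvKeywords) (hne : kw ≠ []) :
    (kw ∈ pvFound L) ↔ PySem.Chars.isIn kw L = true := by
  unfold pvFound
  rw [mem_found_aux, ← PySem.Chars.exists_prefix_drop_iff_isIn]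
  simp only [PySem.Set.empty, List.not_mem_nil, false_or]
  constructor
  · rintro ⟨_, i, _, hs⟩
    exact ⟨i, (PySem.Chars.startswith_iff _ _).mp hs⟩
  · rintro ⟨j, hp⟩
    refine ⟨hk, ?_⟩
    by_cases hj : j < L.length
    · exact ⟨j, hj, (PySem.Chars.startswith_iff _ _).mpr hp⟩
    · exfalso
      have : L.drop j = [] := List.drop_eq_nil_of_le (Nat.le_of_not_lt hj)
      rw [this] at hp
      exact hne (List.prefix_nil.mp hp)

theorem inter_hit (L : List Char) (g : List (List Char))
    (hg : ∀ k ∈ g, k ∈ pvKeywords ∧ k ≠ []) :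
    (!(PySem.Set.inter (pvFound L) g).isEmpty) =
      g.any (fun k => PySem.Chars.isIn k L) := by
  rw [Bool.eq_iff_iff]
  constructor
  · intro h
    have hne : PySem.Set.inter (pvFound L) g ≠ [] := by simpa using h
    rcases List.exists_mem_of_ne_nil _ hne with ⟨x, hx⟩
    have hm := (PySem.Set.mem_inter _ _ _).mp hx
    rw [List.any_eq_true]
    exact ⟨x, hm.2, (mem_found L x (hg x hm.2).1 (hg x hm.2).2).mp hm.1⟩
  · intro h
    rw [List.any_eq_true] at h
    rcases h with ⟨x, hx, hin⟩
    have hx2 : x ∈ PySem.Set.inter (pvFound L) g :=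
      (PySem.Set.mem_inter _ _ _).mpr ⟨(mem_found L x (hg x hx).1 (hg x hx).2).mpr hin, hx⟩
    simp [List.ne_nil_of_mem hx2]

-- ===== VERDICT (by name: the statement is the Claim_ definition above) =====
theorem detect_pattern_py_spec : Claim_equal_detect_pattern_py := by
  intro q _
  unfold Spec_detect_pattern_py detect_pattern_py detect_pattern_py_alt pvRules
  simp only [List.find?, List.any_cons, List.any_nil, Bool.or_false]
  have H : ∀ g : List (List Char), (∀ k ∈ g, k ∈ pvKeywords ∧ k ≠ []) →
      (!(PySem.Set.inter (pvFound (PySem.Str.lower q).toList) g).isEmpty) =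
        g.any (fun k => PySem.Chars.isIn k (PySem.Str.lower q).toList) :=
    fun g hg => inter_hit _ g hg
  rw [H ["quien es".toList, "buscar".toList] (by decide),
      H ["relacion".toList, "vínculo".toList] (by decide),
      H ["documento".toList, "expediente".toList] (by decide),
      H ["relacion".toList, "contexto".toList] (by decide),
      H ["198".toList, "199".toList, "200".toList] (by decide),
      H ["cuántos".toList, "estadística".toList] (by decide),
      H ["organización".toList, "partido".toList] (by decide),
      H ["miembro".toList, "red".toList] (by decide)]
  simp only [List.any_cons, List.any_nil, Bool.or_false, ← PySem.Str.isIn_eq]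
  generalize PySem.Str.isIn "quien es" (PySem.Str.lower q) = b0
  generalize PySem.Str.isIn "buscar" (PySem.Str.lower q) = b1
  generalize PySem.Str.isIn "relacion" (PySem.Str.lower q) = b2
  generalize PySem.Str.isIn "vínculo" (PySem.Str.lower q) = b3
  generalize PySem.Str.isIn "documento" (PySem.Str.lower q) = b4
  generalize PySem.Str.isIn "expediente" (PySem.Str.lower q) = b5
  generalize PySem.Str.isIn "contexto" (PySem.Str.lower q) = b6
  generalize PySem.Str.isIn "198" (PySem.Str.lower q) = b7
  generalize PySem.Str.isIn "199" (PySem.Str.lower q) = b8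
  generalize PySem.Str.isIn "200" (PySem.Str.lower q) = b9
  generalize PySem.Str.isIn "cuántos" (PySem.Str.lower q) = b10
  generalize PySem.Str.isIn "estadística" (PySem.Str.lower q) = b11
  generalize PySem.Str.isIn "organización" (PySem.Str.lower q) = b12
  generalize PySem.Str.isIn "partido" (PySem.Str.lower q) = b13
  generalize PySem.Str.isIn "miembro" (PySem.Str.lower q) = b14
  generalize PySem.Str.isIn "red" (PySem.Str.lower q) = b15
  revert b0 b1 b2 b3 b4 b5 b6 b7 b8 b9 b10 b11 b12 b13 b14 b15
  decide
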